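-- pv_equiv track=rewrite | github.com/hiw20/audio-text-alignment | asr/emission.py | print_alignment
-- ===== SOURCE A (Python) =====
-- def print_alignment(x, y, alignment, inv_hash):
--     seq = ["|"]
--     max_len = -1
--
--     for i, j in alignment:
--         if i is None:
--             if seq[-1] != "|":
--                 seq.append("|")
--
--         else:
--             if x[i] != -1:
--                 seq.append(inv_hash[x[i]] + " ")
--
--     seq = "".join(seq).split("|")
--     max_len_idx = -1
--
--     for i, s in enumerate(seq):
--         if len(s) > max_len:
--             max_len = len(s)
--             max_len_idx = i
--
--     return seq[max_len_idx]
-- ===== SOURCE B (Python) =====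
-- def print_alignment(x, y, alignment, inv_hash):
--     # Flat token stream + numeric bookkeeping: the best segment is kept as an
--     # index window (start, end) into toks plus its length; only the winning
--     # segment's string is ever materialised, at the very end.
--     toks = []
--     best_len = -1
--     best = (0, 0)
--     cur_start = 0
--     cur_len = 0
--     for i, j in alignment:
--         if i is None:
--             if cur_len > 0:
--                 if cur_len > best_len:
--                     best_len = cur_len
--                     best = (cur_start, len(toks))
--                 cur_start = len(toks)
--                 cur_len = 0
--         elif x[i] != -1:
--             t = inv_hash[x[i]]
--             toks.append(t)
--             cur_len += len(t) + 1
--     if cur_len > best_len: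
--         best = (cur_start, len(toks))
--     return "".join(t + " " for t in toks[best[0]:best[1]])
-- ===== Notes on version B (the rewrite author's own statement) =====
-- stated objective: alternative
-- what changed: B never builds segment strings: it streams tokens into one flat list while tracking the current segment and the best segment purely numerically (length counter and an index window (start,end) into the token list), and materialises only the winning segment by joining that window at the end, instead of A's sentinel-delimited string list with join, re-split on '|' and an argmax index over the pieces.
-- outside the precondition, e.g. on print_alignment([0], [], [(0, 0)], {0: 'a|b'}): A returns 'b ', B returns 'a|b '
import Mathlib
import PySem

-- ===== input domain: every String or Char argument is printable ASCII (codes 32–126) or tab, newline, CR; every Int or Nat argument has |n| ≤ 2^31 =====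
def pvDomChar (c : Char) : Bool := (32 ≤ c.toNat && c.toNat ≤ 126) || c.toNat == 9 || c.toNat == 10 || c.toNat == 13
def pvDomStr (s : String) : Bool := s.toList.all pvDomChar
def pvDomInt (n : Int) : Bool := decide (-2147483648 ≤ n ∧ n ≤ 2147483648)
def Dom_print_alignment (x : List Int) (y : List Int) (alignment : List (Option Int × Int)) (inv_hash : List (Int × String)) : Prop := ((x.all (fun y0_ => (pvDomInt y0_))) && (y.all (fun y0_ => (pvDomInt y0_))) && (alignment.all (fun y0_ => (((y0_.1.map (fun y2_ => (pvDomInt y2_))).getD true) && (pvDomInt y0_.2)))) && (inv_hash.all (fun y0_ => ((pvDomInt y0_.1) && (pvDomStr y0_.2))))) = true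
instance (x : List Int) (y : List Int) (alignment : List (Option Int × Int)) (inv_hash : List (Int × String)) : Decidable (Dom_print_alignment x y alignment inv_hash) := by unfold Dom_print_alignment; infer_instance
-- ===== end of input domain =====

-- B never builds segment strings: it streams tokens into one flat list, tracks the
-- current and best segments numerically (length + index window), and joins only the
-- winning window at the end; same return value as A on Pre_.

-- ===== PORT A =====
-- one loop iteration of A: grow the string list `seq`
def pvStepA (x : List Int) (inv_hash : List (Int × String)) (seq : List String) (p : Option Int × Int) : List String :=
  match p.1 with
  | none =>
    if PySem.List.pyGet? seq (-1) ≠ some "|" then seq ++ ["|"] else seq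
  | some i =>
    match PySem.List.pyGet? x i with
    | none => seq            -- x[i] raises IndexError: outside Pre_
    | some v =>
      if v ≠ -1 then
        match (PySem.Dict.mk inv_hash).get? v with
        | none => seq        -- inv_hash[v] raises KeyError: outside Pre_
        | some s => seq ++ [s ++ " "]
      else seq

def print_alignment (x : List Int) (y : List Int) (alignment : List (Option Int × Int)) (inv_hash : List (Int × String)) : String :=
  let seq := alignment.foldl (pvStepA x inv_hash) ["|"]
  -- seq = "".join(seq).split("|")  (split? is total here: the separator "|" is nonempty)
  let pieces := (PySem.Str.split? (PySem.Str.join "" seq) "|").getD []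
  -- for i, s in enumerate(seq): if len(s) > max_len: …
  let r := (PySem.List.enumerate pieces 0).foldl
      (fun (st : Int × Int) (pr : Int × String) =>
        if PySem.Str.len pr.2 > st.1 then (PySem.Str.len pr.2, pr.1) else st)
      (-1, -1)
  -- seq[max_len_idx]  (total here: pieces is nonempty and r.2 points into it)
  (PySem.List.pyGet? pieces r.2).getD ""

-- ===== PORT B =====
-- B's loop state: flat token list, best length, best window [best0, best1),
-- start of the current segment in the token list, current length
structure PvBSt where
  toks : List String
  bestLen : Int
  best0 : Nat
  best1 : Nat
  curStart : Nat
  curLen : Int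
deriving Repr, DecidableEq

-- one loop iteration of B
def pvStepB (x : List Int) (inv_hash : List (Int × String)) (st : PvBSt) (p : Option Int × Int) : PvBSt :=
  match p.1 with
  | none =>
    if st.curLen > 0 then
      if st.curLen > st.bestLen then
        ⟨st.toks, st.curLen, st.curStart, st.toks.length, st.toks.length, 0⟩
      else
        ⟨st.toks, st.bestLen, st.best0, st.best1, st.toks.length, 0⟩
    else st
  | some i =>
    match PySem.List.pyGet? x i with
    | none => st
    | some v =>
      if v ≠ -1 then
        match (PySem.Dict.mk inv_hash).get? v with
        | none => st
        | some t => ⟨st.toks ++ [t], st.bestLen, st.best0, st.best1, st.curStart, st.curLen + (PySem.Str.len t + 1)⟩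
      else st

def print_alignment_alt (x : List Int) (y : List Int) (alignment : List (Option Int × Int)) (inv_hash : List (Int × String)) : String :=
  let st := alignment.foldl (pvStepB x inv_hash) ⟨[], -1, 0, 0, 0, 0⟩
  -- if cur_len > best_len: best = (cur_start, len(toks))
  let best : Nat × Nat := if st.curLen > st.bestLen then (st.curStart, st.toks.length) else (st.best0, st.best1)
  -- "".join(t + " " for t in toks[best[0]:best[1]])
  PySem.Str.join "" ((PySem.List.slice st.toks (some (best.1 : Int)) (some (best.2 : Int))).map (fun t => t ++ " "))

-- ===== PRECONDITION & SPEC =====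
-- all of pvOk for one alignment entry: the index and the dict lookup succeed, and the
-- looked-up token has no '|'
def pvOk (x : List Int) (inv_hash : List (Int × String)) (p : Option Int × Int) : Bool :=
  match p.1 with
  | none => true
  | some i =>
    match PySem.List.pyGet? x i with
    | none => false
    | some v =>
      v == -1 ||
        match (PySem.Dict.mk inv_hash).get? v with
        | none => false
        | some s => !(s.toList.contains '|')

-- Pre_ excludes the inputs on which A raises (IndexError on x[i] / KeyError on inv_hash[x[i]])
-- and the inputs where a looked-up token contains '|', on which A's join-then-split sentinel
-- accidentally cuts that token at the bar.
def Pre_print_alignment (x : List Int) (y : List Int) (alignment : List (Option Int × Int)) (inv_hash : List (Int × String)) : Prop :=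
  alignment.all (pvOk x inv_hash) = true
instance (x : List Int) (y : List Int) (alignment : List (Option Int × Int)) (inv_hash : List (Int × String)) : Decidable (Pre_print_alignment x y alignment inv_hash) := by unfold Pre_print_alignment; infer_instance

def pvWitness_print_alignment : List Int × List Int × (List (Option Int × Int)) × (List (Int × String)) :=
  ([0, 1], [], [(some 0, 0), (none, 1), (some 1, 2), (some 1, 3)], [(0, "ab"), (1, "c")])

def Spec_print_alignment (x : List Int) (y : List Int) (alignment : List (Option Int × Int)) (inv_hash : List (Int × String)) (out : String) : Prop := out = print_alignment_alt x y alignment inv_hash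
instance (x : List Int) (y : List Int) (alignment : List (Option Int × Int)) (inv_hash : List (Int × String)) (out : String) : Decidable (Spec_print_alignment x y alignment inv_hash out) := by unfold Spec_print_alignment; infer_instance

-- ===== CLAIM (what is proved, stated in full; the proofs are below) =====
def Claim_equal_print_alignment : Prop := ∀ (x : List Int) (y : List Int) (alignment : List (Option Int × Int)) (inv_hash : List (Int × String)), Dom_print_alignment x y alignment inv_hash → Pre_print_alignment x y alignment inv_hash → Spec_print_alignment x y alignment inv_hash (print_alignment x y alignment inv_hash)

-- ===== LEMMAS AND PROOFS =====

-- ghost intermediate (proof helper only): the segments-as-strings single pass;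
-- A is proved equal to it, and B is proved equal to it, unconditionally chaining the two.
def pvStepOld (x : List Int) (inv_hash : List (Int × String)) (st : List String × String) (p : Option Int × Int) : List String × String :=
  match p.1 with
  | none =>
    if st.2 ≠ "" then (st.1 ++ [st.2], "") else st
  | some i =>
    match PySem.List.pyGet? x i with
    | none => st
    | some v =>
      if v ≠ -1 then
        match (PySem.Dict.mk inv_hash).get? v with
        | none => st
        | some s => (st.1, st.2 ++ (s ++ " "))
      else st

def pvOldRun (x : List Int) (y : List Int) (alignment : List (Option Int × Int)) (inv_hash : List (Int × String)) : String :=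
  let st := alignment.foldl (pvStepOld x inv_hash) ([""], "")
  match st.1 ++ [st.2] with
  | [] => ""
  | b :: rest =>
    rest.foldl (fun best s => if PySem.Str.len s > PySem.Str.len best then s else best) b

-- structural model of Python's split on the one-character separator "|"
def pvSplit : List Char → List (List Char)
  | [] => [[]]
  | c :: rest =>
    if c = '|' then [] :: pvSplit rest
    else match pvSplit rest with
      | [] => [[c]]
      | h :: t => (c :: h) :: t

def pvConsHead (p : List Char) : List (List Char) → List (List Char)
  | [] => [p]
  | h :: t => (p ++ h) :: t

theorem pvSplit_ne_nil (cs : List Char) : pvSplit cs ≠ [] := by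
  match cs with
  | [] => simp [pvSplit]
  | c :: rest =>
    simp only [pvSplit]
    split
    · simp
    · split <;> simp

theorem splitOn_go_spec : ∀ (l : List Char) (fuel : Nat) (cur : List Char) (acc : List (List Char)),
    l.length < fuel →
    PySem.Chars.splitOn.go ['|'] fuel l cur acc =
      acc.reverse ++ pvConsHead cur.reverse (pvSplit l) := by
  intro l
  induction l with
  | nil =>
    intro fuel cur acc h
    match fuel with
    | f + 1 => simp [PySem.Chars.splitOn.go, pvSplit, pvConsHead]
  | cons c rest ih =>
    intro fuel cur acc h
    match fuel with
    | f + 1 =>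
      rw [PySem.Chars.splitOn.go]
      by_cases hc : c = '|'
      · subst hc
        simp only [beq_self_eq_true, if_pos, List.length_singleton, List.drop_succ_cons,
          List.drop_zero]
        rw [ih f [] (cur.reverse :: acc) (by simpa using Nat.lt_of_succ_lt_succ h)]
        simp only [pvSplit, List.reverse_cons, List.reverse_nil,
          List.nil_append, pvConsHead, List.append_assoc]
        cases hs : pvSplit rest with
        | nil => exact absurd hs (pvSplit_ne_nil rest)
        | cons a t => simp [pvConsHead]
      · rw [if_neg (by simp [Ne.symm hc])]
        rw [ih f (c :: cur) acc (by simpa using Nat.lt_of_succ_lt_succ h)]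
        simp only [pvSplit, if_neg hc, List.reverse_cons]
        cases hs : pvSplit rest with
        | nil => exact absurd hs (pvSplit_ne_nil rest)
        | cons a t => simp [pvConsHead]

theorem splitOn_eq_pvSplit (cs : List Char) : PySem.Chars.splitOn cs ['|'] = pvSplit cs := by
  rw [PySem.Chars.splitOn, splitOn_go_spec cs (cs.length + 1) [] [] (by omega)]
  cases h : pvSplit cs with
  | nil => exact absurd h (pvSplit_ne_nil cs)
  | cons a t => simp [pvConsHead]

theorem pvSplit_barfree (cs : List Char) (h : '|' ∉ cs) : pvSplit cs = [cs] := by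
  induction cs with
  | nil => rfl
  | cons c rest ih =>
    simp only [List.mem_cons, not_or] at h
    simp [pvSplit, Ne.symm h.1, ih h.2]

theorem pvSplit_append_bar (a b : List Char) (h : '|' ∉ a) :
    pvSplit (a ++ '|' :: b) = a :: pvSplit b := by
  induction a with
  | nil => simp [pvSplit]
  | cons c rest ih =>
    simp only [List.mem_cons, not_or] at h
    simp [pvSplit, Ne.symm h.1, ih h.2]

theorem icat_append_singleton (l : List (List Char)) (b : List Char) (h : l ≠ []) :
    List.intercalate ['|'] (l ++ [b]) = List.intercalate ['|'] l ++ '|' :: b := by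
  induction l with
  | nil => exact absurd rfl h
  | cons a t ih =>
    cases t with
    | nil => simp [List.intercalate, List.intersperse]
    | cons a' t' =>
      have h1 : ∀ m : List (List Char), List.intercalate ['|'] (a :: a' :: m)
          = a ++ ['|'] ++ List.intercalate ['|'] (a' :: m) := by
        intro m; simp [List.intercalate, List.intersperse]
      rw [show (a :: a' :: t') ++ [b] = a :: a' :: (t' ++ [b]) by simp, h1,
        show a' :: (t' ++ [b]) = (a' :: t') ++ [b] from by simp, ih (by simp), h1]
      simp

theorem icat_extend_last (l : List (List Char)) (a t : List Char) :
    List.intercalate ['|'] (l ++ [a ++ t]) = List.intercalate ['|'] (l ++ [a]) ++ t := by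
  cases l with
  | nil => simp [List.intercalate]
  | cons p ps =>
    rw [icat_append_singleton _ _ (by simp), icat_append_singleton _ _ (by simp)]
    simp

theorem pvSplit_intercalate : ∀ (parts : List (List Char)), (∀ p ∈ parts, '|' ∉ p) →
    parts ≠ [] → pvSplit (List.intercalate ['|'] parts) = parts := by
  intro parts
  induction parts with
  | nil => intro _ h; exact absurd rfl h
  | cons p ps ih =>
    intro hbf _
    cases ps with
    | nil =>
      rw [show List.intercalate ['|'] [p] = p by simp [List.intercalate]]
      exact pvSplit_barfree p (hbf p (by simp))
    | cons q qs =>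
      rw [show List.intercalate ['|'] (p :: q :: qs)
          = p ++ '|' :: List.intercalate ['|'] (q :: qs) by
        simp [List.intercalate, List.intersperse]]
      rw [pvSplit_append_bar _ _ (hbf p (by simp)),
        ih (fun r hr => hbf r (by simp [hr])) (by simp)]

theorem app_space_ne_bar (s : String) : (s ++ " ") ≠ "|" := by
  intro h
  have h2 : s.toList ++ [' '] = ['|'] := by
    have := congrArg String.toList h
    simpa [String.toList_append] using this
  cases hs : s.toList with
  | nil => rw [hs] at h2; exact (by decide : (([' '] : List Char) ≠ ['|'])) (by simpa using h2)
  | cons a t => rw [hs] at h2; have := congrArg List.length h2; simp at this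

theorem app_space_ne_empty (a s : String) : (a ++ (s ++ " ")) ≠ "" := by
  intro h
  have h2 := congrArg String.toList h
  simp [String.toList_append] at h2

-- the loop invariant tying A's string list to the ghost pass's (segments, current) state
def pvInv (seq : List String) (st : List String × String) : Prop :=
  (seq.map String.toList).flatten
      = List.intercalate ['|'] ((st.1 ++ [st.2]).map String.toList)
    ∧ (PySem.List.pyGet? seq (-1) = some "|" ↔ st.2 = "")
    ∧ (∀ s ∈ st.1 ++ [st.2], '|' ∉ s.toList)

theorem step_inv (x : List Int) (inv_hash : List (Int × String)) (p : Option Int × Int)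
    (hp : pvOk x inv_hash p = true) (seq : List String) (st : List String × String)
    (h : pvInv seq st) :
    pvInv (pvStepA x inv_hash seq p) (pvStepOld x inv_hash st p) := by
  obtain ⟨o, j⟩ := p
  obtain ⟨hflat, hbar, hbf⟩ := h
  cases o with
  | none =>
    by_cases hcur : st.2 = ""
    · have hA : PySem.List.pyGet? seq (-1) = some "|" := hbar.mpr hcur
      simp only [pvStepA, pvStepOld, hA, hcur, ne_eq, not_true_eq_false, if_false, if_neg]
      exact ⟨hflat, hbar, hbf⟩
    · have hA : PySem.List.pyGet? seq (-1) ≠ some "|" := fun hc => hcur (hbar.mp hc)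
      simp only [pvStepA, pvStepOld, ne_eq, hA, not_false_eq_true, if_pos, if_neg, hcur]
      refine ⟨?_, ?_, ?_⟩
      · rw [List.map_append, List.flatten_append, hflat]
        have : ((st.1 ++ [st.2], "").1 ++ [(st.1 ++ [st.2], "").2]).map String.toList
            = ((st.1 ++ [st.2]).map String.toList) ++ [[]] := by simp
        rw [this, icat_append_singleton _ _ (by simp)]
        simp [show ("|" : String).toList = ['|'] from rfl]
      · simp [PySem.List.pyGet?_neg_one_append_singleton]
      · intro s hs
        simp only [List.mem_append, List.mem_singleton] at hs
        rcases hs with (h1 | h1) | h1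
        · exact hbf s (by simp [h1])
        · exact hbf s (by simp [h1])
        · subst h1; simp
  | some i =>
    simp only [pvOk] at hp
    cases hgx : PySem.List.pyGet? x i with
    | none => rw [hgx] at hp; simp at hp
    | some v =>
      rw [hgx] at hp
      have hp' : (v == -1 || match (PySem.Dict.mk inv_hash).get? v with
          | none => false
          | some s => !s.toList.contains '|') = true := hp
      by_cases hv : v = -1
      · simp only [pvStepA, pvStepOld, hgx, hv, ne_eq, not_true_eq_false, if_false, if_neg]
        exact ⟨hflat, hbar, hbf⟩
      · cases hgd : (PySem.Dict.mk inv_hash).get? v with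
        | none => rw [hgd] at hp'; simp [hv] at hp'
        | some s =>
          rw [hgd] at hp'
          have hsbf : '|' ∉ s.toList := by
            simp only [Bool.or_eq_true, beq_iff_eq, hv, false_or, Bool.not_eq_true',
              List.contains_eq_mem, decide_eq_false_iff_not] at hp'
            exact hp'
          simp only [pvStepA, pvStepOld, hgx, hgd, ne_eq, hv, not_false_eq_true, if_pos]
          refine ⟨?_, ?_, ?_⟩
          · rw [List.map_append, List.flatten_append, hflat]
            have h1 : ((st.1, st.2 ++ (s ++ " ")).1 ++ [(st.1, st.2 ++ (s ++ " ")).2]).map String.toList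
                = (st.1.map String.toList) ++ [st.2.toList ++ (s ++ " ").toList] := by
              simp [String.toList_append]
            have h2 : ((st.1 ++ [st.2]).map String.toList)
                = (st.1.map String.toList) ++ [st.2.toList] := by simp
            rw [h1, icat_extend_last, ← h2]
            simp [String.toList_append]
          · constructor
            · intro hc
              rw [PySem.List.pyGet?_neg_one_append_singleton] at hc
              exact absurd (Option.some.inj hc) (app_space_ne_bar s)
            · intro hc
              exact absurd hc (app_space_ne_empty st.2 s)
          · intro t ht
            simp only [List.mem_append, List.mem_singleton] at ht
            rcases ht with h1 | h1
            · exact hbf t (by simp [h1])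
            · subst h1
              have h2 : (st.2 ++ (s ++ " ")).toList = st.2.toList ++ s.toList ++ [' '] := by
                simp [String.toList_append]
              rw [h2]
              simp only [List.mem_append, List.mem_singleton]
              rintro ((hc | hc) | hc)
              · exact hbf st.2 (by simp) hc
              · exact hsbf hc
              · exact absurd hc (by decide)

theorem fold_inv (x : List Int) (inv_hash : List (Int × String)) :
    ∀ (al : List (Option Int × Int)) (seq : List String) (st : List String × String),
    al.all (pvOk x inv_hash) = true → pvInv seq st →
    pvInv (al.foldl (pvStepA x inv_hash) seq) (al.foldl (pvStepOld x inv_hash) st) := by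
  intro al
  induction al with
  | nil => intro seq st _ h; exact h
  | cons p rest ih =>
    intro seq st hall h
    simp only [List.all_cons, Bool.and_eq_true] at hall
    exact ih _ _ hall.2 (step_inv x inv_hash p hall.1 seq st h)

theorem sel_aux (L : List String) : ∀ (rest : List String) (n : Nat) (best : String) (bi : Int),
    L.drop n = rest → PySem.List.pyGet? L bi = some best →
    (PySem.List.pyGet? L
        (((PySem.List.enumerate rest (n : Int)).foldl
          (fun (st : Int × Int) (pr : Int × String) =>
            if PySem.Str.len pr.2 > st.1 then (PySem.Str.len pr.2, pr.1) else st)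
          (PySem.Str.len best, bi)).2)).getD ""
      = rest.foldl (fun best s => if PySem.Str.len s > PySem.Str.len best then s else best) best := by
  intro rest
  induction rest with
  | nil =>
    intro n best bi _ hget
    simp [PySem.List.enumerate, hget]
  | cons r rest' ih =>
    intro n best bi hdrop hget
    have hn : n < L.length := by
      by_contra hc
      rw [List.drop_eq_nil_of_le (by omega)] at hdrop
      exact absurd hdrop (by simp)
    have hdec := List.drop_eq_getElem_cons hn
    rw [hdrop] at hdec
    have hr : L[n] = r := by exact (List.cons.inj hdec.symm).1
    have hdrop' : L.drop (n + 1) = rest' := by exact ((List.cons.inj hdec.symm).2.symm).symm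
    rw [PySem.List.enumerate_cons]
    simp only [List.foldl_cons]
    by_cases hlen : PySem.Str.len r > PySem.Str.len best
    · rw [if_pos hlen, if_pos hlen]
      have hgn : PySem.List.pyGet? L ((n : Int)) = some r := by
        rw [PySem.List.pyGet?_natCast, List.getElem?_eq_getElem hn, hr]
      have := ih (n + 1) r (n : Int) hdrop' hgn
      rw [show ((n + 1 : Nat) : Int) = ((n : Int) + 1) by push_cast; ring] at this
      exact this
    · rw [if_neg hlen, if_neg hlen]
      have := ih (n + 1) best bi hdrop' hget
      rw [show ((n + 1 : Nat) : Int) = ((n : Int) + 1) by push_cast; ring] at this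
      exact this

theorem icat_nil (l : List (List Char)) : List.intercalate ([] : List Char) l = l.flatten := by
  induction l with
  | nil => rfl
  | cons a t ih =>
    cases t with
    | nil => simp [List.intercalate]
    | cons b t' =>
      rw [show List.intercalate ([] : List Char) (a :: b :: t')
          = a ++ [] ++ List.intercalate [] (b :: t') from by
        simp [List.intercalate, List.intersperse], ih]
      simp

theorem init_inv : pvInv ["|"] ([""], "") := by
  refine ⟨by decide, by decide, by decide⟩

-- A equals the ghost pass on Pre_
theorem A_eq_old (x : List Int) (y : List Int) (al : List (Option Int × Int)) (ih : List (Int × String))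
    (hpre : al.all (pvOk x ih) = true) :
    print_alignment x y al ih = pvOldRun x y al ih := by
  have hinv := fold_inv x ih al ["|"] ([""], "") hpre init_inv
  set seq := al.foldl (pvStepA x ih) ["|"] with hseq
  set st := al.foldl (pvStepOld x ih) ([""], "") with hst
  obtain ⟨hflat, _, hbf⟩ := hinv
  have hJ : (PySem.Str.join "" seq).toList
      = List.intercalate ['|'] ((st.1 ++ [st.2]).map String.toList) := by
    rw [PySem.Str.toList_join]
    show List.intercalate ([] : List Char) (seq.map String.toList) = _
    rw [icat_nil, hflat]
  have hsplit : (PySem.Str.split? (PySem.Str.join "" seq) "|").getD [] = st.1 ++ [st.2] := by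
    rw [PySem.Str.split?]
    show ((PySem.Chars.split? (PySem.Str.join "" seq).toList ['|']).map
        (fun x => x.map String.ofList)).getD [] = _
    rw [PySem.Chars.split?, if_neg (by simp)]
    rw [hJ, splitOn_eq_pvSplit, pvSplit_intercalate _ ?_ (by simp)]
    · simp [List.map_map, Function.comp_def, String.ofList_toList]
    · intro p hp
      obtain ⟨s, hs, rfl⟩ := List.mem_map.mp hp
      exact hbf s hs
  rw [print_alignment, pvOldRun]
  simp only [← hseq, ← hst, hsplit]
  cases hps : st.1 ++ [st.2] with
  | nil => exact absurd hps (by simp)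
  | cons b rest =>
    rw [PySem.List.enumerate_cons]
    simp only [List.foldl_cons]
    rw [if_pos (by rw [PySem.Str.len_eq]; omega)]
    rw [show ((0 : Int) + 1) = ((1 : Nat) : Int) from by norm_num]
    exact sel_aux (b :: rest) rest 1 b 0 (by simp) (PySem.List.pyGet?_zero_cons b rest)

-- ===== ghost pass = B : the window invariant =====

def segCat (l : List String) : String := PySem.Str.join "" (l.map (fun t => t ++ " "))

def pvF (p : Int × String) (s : String) : Int × String :=
  if PySem.Str.len s > p.1 then (PySem.Str.len s, s) else p

def pvG (best s : String) : String :=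
  if PySem.Str.len s > PySem.Str.len best then s else best

def bestOf (segs : List String) : Int × String := segs.foldl pvF (-1, "")

theorem str_len_nonneg (s : String) : 0 ≤ PySem.Str.len s := by
  rw [PySem.Str.len_eq]; omega

theorem str_toList_inj {a b : String} (h : a.toList = b.toList) : a = b := by
  have := congrArg String.ofList h
  simpa [String.ofList_toList] using this

theorem str_len_pos_iff (s : String) : 0 < PySem.Str.len s ↔ s ≠ "" := by
  rw [PySem.Str.len_eq]
  constructor
  · intro h hc; subst hc; simp at h
  · intro h
    have : s.toList ≠ [] := fun hc => h (str_toList_inj (by simpa using hc))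
    have := List.length_pos_of_ne_nil this
    omega

theorem segCat_toList (l : List String) :
    (segCat l).toList = ((l.map (fun t => t ++ " ")).map String.toList).flatten := by
  rw [segCat, PySem.Str.toList_join]
  show List.intercalate ([] : List Char) _ = _
  rw [icat_nil]

theorem segCat_nil : segCat [] = "" := by decide

theorem segCat_append_singleton (l : List String) (t : String) :
    segCat (l ++ [t]) = segCat l ++ (t ++ " ") := by
  apply str_toList_inj
  rw [String.toList_append, segCat_toList, segCat_toList]
  simp [String.toList_append]

theorem fold_pair (rest : List String) : ∀ (b : String),
    rest.foldl pvF (PySem.Str.len b, b) = (PySem.Str.len (rest.foldl pvG b), rest.foldl pvG b) := by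
  induction rest with
  | nil => intro b; rfl
  | cons s rest' ihr =>
    intro b
    simp only [List.foldl_cons, pvF, pvG]
    by_cases h : PySem.Str.len s > PySem.Str.len b
    · rw [if_pos h, if_pos h]; exact ihr s
    · rw [if_neg h, if_neg h]; exact ihr b

theorem bestOf_cons (b : String) (rest : List String) :
    bestOf (b :: rest) = (PySem.Str.len (rest.foldl pvG b), rest.foldl pvG b) := by
  rw [bestOf, List.foldl_cons]
  have : pvF (-1, "") b = (PySem.Str.len b, b) := by
    rw [pvF, if_pos]; have := str_len_nonneg b; omega
  rw [this, fold_pair]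

theorem bestOf_append_singleton (segs : List String) (c : String) :
    bestOf (segs ++ [c]) = pvF (bestOf segs) c := by
  rw [bestOf, bestOf, List.foldl_append, List.foldl_cons, List.foldl_nil]

-- the invariant between the ghost (segments, current) state and B's numeric state
def pvInv2 (st : List String × String) (n : PvBSt) : Prop :=
  st.2 = segCat (n.toks.drop n.curStart)
  ∧ n.curLen = PySem.Str.len st.2
  ∧ n.curStart ≤ n.toks.length
  ∧ n.best0 ≤ n.best1 ∧ n.best1 ≤ n.toks.length
  ∧ bestOf st.1 = (max n.bestLen 0, segCat ((n.toks.drop n.best0).take (n.best1 - n.best0)))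
  ∧ (n.bestLen < 0 → n.curStart = 0 ∧ n.best0 = 0 ∧ n.best1 = 0)


theorem seg_window_full (toks : List String) (cs : Nat) :
    segCat ((toks.drop cs).take (toks.length - cs)) = segCat (toks.drop cs) := by
  have h : (toks.drop cs).length = toks.length - cs := by simp
  rw [← h, List.take_length]

theorem step_inv2 (x : List Int) (inv_hash : List (Int × String)) (p : Option Int × Int)
    (st : List String × String) (n : PvBSt) (h : pvInv2 st n) :
    pvInv2 (pvStepOld x inv_hash st p) (pvStepB x inv_hash n p) := by
  obtain ⟨o, j⟩ := p
  obtain ⟨hcur, hcl, hcs, hb01, hb1, hbest, hneg⟩ := h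
  cases o with
  | none =>
    by_cases hc : st.2 = ""
    · have h0 : ¬ n.curLen > 0 := by
        rw [hcl, hc]; decide
      simp only [pvStepOld, pvStepB, ne_eq, hc, not_true_eq_false, if_false, h0]
      exact ⟨hcur, hcl, hcs, hb01, hb1, hbest, hneg⟩
    · have h0 : n.curLen > 0 := by
        rw [hcl]; exact (str_len_pos_iff st.2).mpr hc
      have hwin : segCat ((n.toks.drop n.curStart).take (n.toks.length - n.curStart)) = st.2 := by
        rw [seg_window_full, ← hcur]
      have hdropall : segCat (n.toks.drop n.toks.length) = "" := by
        simp [segCat_nil]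
      by_cases hgt : n.curLen > n.bestLen
      · simp only [pvStepOld, pvStepB, ne_eq, hc, not_false_eq_true, if_pos, h0, hgt]
        refine ⟨?_, ?_, ?_, ?_, ?_, ?_, ?_⟩
        · exact hdropall.symm
        · show (0 : Int) = PySem.Str.len ""
          decide
        · exact le_refl _
        · exact hcs
        · exact le_refl _
        · show bestOf (st.1 ++ [st.2])
            = (max n.curLen 0, segCat ((n.toks.drop n.curStart).take (n.toks.length - n.curStart)))
          have h6 : max n.curLen 0 = PySem.Str.len st.2 := by omega
          rw [bestOf_append_singleton, hbest, pvF, if_pos (by rw [← hcl]; omega), hwin, ← h6]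
        · show n.curLen < 0 → n.toks.length = 0 ∧ n.curStart = 0 ∧ n.toks.length = 0
          intro hlt; exact absurd hlt (by omega)
      · simp only [pvStepOld, pvStepB, ne_eq, hc, not_false_eq_true, if_pos, h0, hgt, if_false]
        refine ⟨?_, ?_, ?_, ?_, ?_, ?_, ?_⟩
        · exact hdropall.symm
        · show (0 : Int) = PySem.Str.len ""
          decide
        · exact le_refl _
        · exact hb01
        · exact hb1
        · show bestOf (st.1 ++ [st.2])
            = (max n.bestLen 0, segCat ((n.toks.drop n.best0).take (n.best1 - n.best0)))
          rw [bestOf_append_singleton, hbest, pvF, if_neg (by rw [← hcl]; omega)]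
        · show n.bestLen < 0 → n.toks.length = 0 ∧ n.best0 = 0 ∧ n.best1 = 0
          intro hlt; exact absurd hlt (by omega)
  | some i =>
    cases hgx : PySem.List.pyGet? x i with
    | none =>
      simp only [pvStepOld, pvStepB, hgx]
      exact ⟨hcur, hcl, hcs, hb01, hb1, hbest, hneg⟩
    | some v =>
      by_cases hv : v = -1
      · simp only [pvStepOld, pvStepB, hgx, hv, ne_eq, not_true_eq_false, if_false]
        exact ⟨hcur, hcl, hcs, hb01, hb1, hbest, hneg⟩
      · cases hgd : (PySem.Dict.mk inv_hash).get? v with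
        | none =>
          simp only [pvStepOld, pvStepB, hgx, hgd, ne_eq, hv, not_false_eq_true, if_pos]
          exact ⟨hcur, hcl, hcs, hb01, hb1, hbest, hneg⟩
        | some t =>
          simp only [pvStepOld, pvStepB, hgx, hgd, ne_eq, hv, not_false_eq_true, if_pos]
          have hb0len : n.best0 ≤ n.toks.length := le_trans hb01 hb1
          refine ⟨?_, ?_, ?_, ?_, ?_, ?_, ?_⟩
          · show st.2 ++ (t ++ " ") = segCat ((n.toks ++ [t]).drop n.curStart)
            rw [List.drop_append_of_le_length hcs, segCat_append_singleton, ← hcur]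
          · show n.curLen + (PySem.Str.len t + 1) = PySem.Str.len (st.2 ++ (t ++ " "))
            have hlen : PySem.Str.len (st.2 ++ (t ++ " "))
                = PySem.Str.len st.2 + (PySem.Str.len t + 1) := by
              simp only [PySem.Str.len_eq, String.toList_append, List.length_append]
              push_cast
              simp
            rw [hlen, hcl]
          · show n.curStart ≤ (n.toks ++ [t]).length
            simp only [List.length_append, List.length_singleton]
            omega
          · exact hb01
          · show n.best1 ≤ (n.toks ++ [t]).length
            simp only [List.length_append, List.length_singleton]
            omega
          · show bestOf st.1
              = (max n.bestLen 0, segCat (((n.toks ++ [t]).drop n.best0).take (n.best1 - n.best0)))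
            rw [List.drop_append_of_le_length hb0len,
              List.take_append_of_le_length (by simp only [List.length_drop]; omega)]
            exact hbest
          · intro hlt
            exact hneg hlt

theorem fold_inv2 (x : List Int) (inv_hash : List (Int × String)) :
    ∀ (al : List (Option Int × Int)) (st : List String × String) (n : PvBSt),
    pvInv2 st n →
    pvInv2 (al.foldl (pvStepOld x inv_hash) st) (al.foldl (pvStepB x inv_hash) n) := by
  intro al
  induction al with
  | nil => intro st n h; exact h
  | cons p rest ihr =>
    intro st n h
    exact ihr _ _ (step_inv2 x inv_hash p st n h)

theorem init_inv2 : pvInv2 ([""], "") ⟨[], -1, 0, 0, 0, 0⟩ := by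
  refine ⟨by decide, by decide, by decide, by decide, by decide, by decide, by decide⟩

theorem oldRun_final (segs : List String) (cur : String) :
    (match segs ++ [cur] with
      | [] => ""
      | b :: rest => rest.foldl pvG b) = (bestOf (segs ++ [cur])).2 := by
  cases hps : segs ++ [cur] with
  | nil => exact absurd hps (by simp)
  | cons b rest => rw [bestOf_cons]


theorem old_eq_alt (x : List Int) (y : List Int) (al : List (Option Int × Int)) (ih : List (Int × String)) :
    pvOldRun x y al ih = print_alignment_alt x y al ih := by
  have hinv := fold_inv2 x ih al ([""], "") ⟨[], -1, 0, 0, 0, 0⟩ init_inv2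
  rw [pvOldRun, print_alignment_alt]
  set st := al.foldl (pvStepOld x ih) ([""], "") with hst
  set n := al.foldl (pvStepB x ih) ⟨[], -1, 0, 0, 0, 0⟩ with hn
  obtain ⟨hcur, hcl, hcs, hb01, hb1, hbest, hneg⟩ := hinv
  have hG : (fun best s => if PySem.Str.len s > PySem.Str.len best then s else best) = pvG := by
    funext a b; rw [pvG]
  rw [hG, oldRun_final, bestOf_append_singleton, hbest, pvF]
  have hnn : 0 ≤ PySem.Str.len st.2 := str_len_nonneg st.2
  by_cases hgt : n.curLen > n.bestLen
  · rw [if_pos hgt]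
    show (if PySem.Str.len st.2 > max n.bestLen 0
        then (PySem.Str.len st.2, st.2)
        else (max n.bestLen 0, segCat ((n.toks.drop n.best0).take (n.best1 - n.best0)))).2
      = PySem.Str.join ""
          ((PySem.List.slice n.toks (some ((n.curStart : Nat) : Int)) (some ((n.toks.length : Nat) : Int))).map
            (fun t => t ++ " "))
    rw [PySem.List.slice_natCast]
    show _ = segCat ((n.toks.drop n.curStart).take (n.toks.length - n.curStart))
    rw [seg_window_full, ← hcur]
    by_cases hpos : PySem.Str.len st.2 > max n.bestLen 0
    · rw [if_pos hpos]
    · rw [if_neg hpos]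
      -- degenerate case: nothing was ever closed and the current segment is empty
      have h1 : n.bestLen < 0 := by omega
      obtain ⟨hcs0, hb00, hb10⟩ := hneg h1
      have hcur0 : st.2 = "" := by
        by_contra hcne
        have := (str_len_pos_iff st.2).mpr hcne
        omega
      show segCat ((n.toks.drop n.best0).take (n.best1 - n.best0)) = st.2
      rw [hb00, hb10, hcur0]
      simp [segCat_nil]
  · rw [if_neg hgt]
    have hle : ¬ PySem.Str.len st.2 > max n.bestLen 0 := by omega
    rw [if_neg hle]
    show (max n.bestLen 0, segCat ((n.toks.drop n.best0).take (n.best1 - n.best0))).2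
      = PySem.Str.join ""
          ((PySem.List.slice n.toks (some ((n.best0 : Nat) : Int)) (some ((n.best1 : Nat) : Int))).map
            (fun t => t ++ " "))
    rw [PySem.List.slice_natCast]
    rfl

-- ===== VERDICT (by name: the statement is the Claim_ definition above) =====
theorem print_alignment_spec : Claim_equal_print_alignment := by
  intro x y al ih _ hpre
  show print_alignment x y al ih = print_alignment_alt x y al ih
  rw [A_eq_old x y al ih hpre, old_eq_alt]
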